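-- pv_equiv track=rewrite | github.com/RuiBoGithub/csv2latex-table | csv2latex-table.py | process_header_row
-- ===== SOURCE A (Python) =====
-- def process_header_row(row, prev_row=None):
--     """
--     Convert header row to LaTeX format with partial horizontal lines
--     - row: Current header row
--     - prev_row: Previous header row (for detecting subgroup boundaries)
--     """
--     processed = []
--     n = len(row)
--
--     # Track subgroup boundaries
--     subgroup_ranges = []
--     start_idx = None
--
--     # Find subgroups (cells with content after empty cells)
--     for i, cell in enumerate(row):
--         if cell and cell != r'\textemdash':
--             if start_idx is not None:
--                 subgroup_ranges.append((start_idx, i-1))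
--                 start_idx = None
--         else:
--             if start_idx is None:
--                 start_idx = i
--     if start_idx is not None:
--         subgroup_ranges.append((start_idx, n-1))
--
--     # Process each cell
--     for i, cell in enumerate(row):
--         if cell and cell != r'\textemdash':
--             # Check if this cell is part of a subgroup
--             in_subgroup = any(start <= i <= end for start, end in subgroup_ranges)
--
--             # Check if previous row has content in this column
--             prev_has_content = prev_row and i < len(prev_row) and prev_row[i] and prev_row[i] != r'\textemdash'
--
--             # Add partial horizontal line above if needed
--             if in_subgroup and not prev_has_content:
--                 # Find subgroup range for this cell
--                 subgroup_range = next((r for r in subgroup_ranges if r[0] <= i <= r[1]), None)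
--                 if subgroup_range:
--                     start, end = subgroup_range
--                     processed.append(r"\cmidrule(lr){" + f"{start+1}-{end+1}" + r"}" + "\n")
--
--             processed.append(cell)
--         else:
--             processed.append('')
--
--     return processed
-- ===== SOURCE B (Python) =====
-- def process_header_row(row, prev_row=None):
--     # One flat pass: keep content cells, blank out empty/'\textemdash' cells.
--     # (A's subgroup/cmidrule machinery only ever covers non-content cells, so it
--     # can never fire on a content cell and contributes nothing to the output.)
--     return [cell if (cell and cell != r'\textemdash') else '' for cell in row]
-- ===== Notes on version B (the rewrite author's own statement) =====
-- stated objective: simpler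
-- what changed: Dropped A's two extra passes (building subgroup_ranges, then scanning them per content cell, plus the prev_row check): the ranges cover only non-content cells so the cmidrule branch is unreachable, and B is a single direct map over the row.
import Mathlib
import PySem

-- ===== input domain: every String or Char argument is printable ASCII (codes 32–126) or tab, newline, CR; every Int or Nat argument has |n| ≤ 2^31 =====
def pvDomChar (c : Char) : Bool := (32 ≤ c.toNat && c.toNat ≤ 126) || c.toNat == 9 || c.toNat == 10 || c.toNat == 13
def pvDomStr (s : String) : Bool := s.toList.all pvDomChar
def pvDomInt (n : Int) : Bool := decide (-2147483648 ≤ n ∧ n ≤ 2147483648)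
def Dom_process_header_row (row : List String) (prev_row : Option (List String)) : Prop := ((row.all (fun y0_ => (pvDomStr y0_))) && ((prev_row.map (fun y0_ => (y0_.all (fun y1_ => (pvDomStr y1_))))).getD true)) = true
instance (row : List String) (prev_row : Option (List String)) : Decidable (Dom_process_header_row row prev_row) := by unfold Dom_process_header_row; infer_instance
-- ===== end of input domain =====

-- B replaces A's range-table-plus-scan with one direct map over the row (objective: simpler;
-- A's cmidrule branch is unreachable, proved by the equivalence below).

-- ===== PORT A =====
-- Python truthiness test `cell and cell != r'\textemdash'`
def pvIsContent (c : String) : Bool := !(c == "" || c == "\\textemdash")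

-- A's first loop: find subgroup ranges (state: accumulated ranges, open start index)
def pvFindRanges (n : Nat) : List String → Nat → List (Nat × Nat) → Option Nat → List (Nat × Nat)
  | [], _i, ranges, start =>
      match start with
      | some s => ranges ++ [(s, n - 1)]
      | none => ranges
  | c :: rest, i, ranges, start =>
      if pvIsContent c then
        match start with
        | some s => pvFindRanges n rest (i + 1) (ranges ++ [(s, i - 1)]) none
        | none => pvFindRanges n rest (i + 1) ranges none
      else
        match start with
        | none => pvFindRanges n rest (i + 1) ranges (some i)
        | some s => pvFindRanges n rest (i + 1) ranges (some s)

-- A's second loop: process each cell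
def pvProcess (ranges : List (Nat × Nat)) (prev_row : Option (List String)) : List String → Nat → List String
  | [], _i => []
  | c :: rest, i =>
      if pvIsContent c then
        let in_subgroup := ranges.any (fun r => decide (r.1 ≤ i ∧ i ≤ r.2))
        let prev_has :=
          match prev_row with
          | none => false
          | some pr => !pr.isEmpty && decide (i < pr.length) && pvIsContent (pr.getD i "")
        (if in_subgroup && !prev_has then
          match ranges.find? (fun r => decide (r.1 ≤ i ∧ i ≤ r.2)) with
          | some r => ["\\cmidrule(lr){" ++ toString (r.1 + 1) ++ "-" ++ toString (r.2 + 1) ++ "}\n", c]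
          | none => [c]
        else [c]) ++ pvProcess ranges prev_row rest (i + 1)
      else "" :: pvProcess ranges prev_row rest (i + 1)

def process_header_row (row : List String) (prev_row : Option (List String)) : List String :=
  pvProcess (pvFindRanges row.length row 0 [] none) prev_row row 0

-- ===== PORT B =====
def process_header_row_alt (row : List String) (prev_row : Option (List String)) : List String :=
  row.map (fun cell => if cell ≠ "" ∧ cell ≠ "\\textemdash" then cell else "")

-- ===== PRECONDITION & SPEC =====
def Spec_process_header_row (row : List String) (prev_row : Option (List String)) (out : List String) : Prop := out = process_header_row_alt row prev_row
instance (row : List String) (prev_row : Option (List String)) (out : List String) : Decidable (Spec_process_header_row row prev_row out) := by unfold Spec_process_header_row; infer_instance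

-- ===== CLAIM (what is proved, stated in full; the proofs are below) =====
def Claim_equal_process_header_row : Prop := ∀ (row : List String) (prev_row : Option (List String)), Dom_process_header_row row prev_row → Spec_process_header_row row prev_row (process_header_row row prev_row)

-- ===== LEMMAS AND PROOFS =====

theorem pvIsContent_iff (c : String) : pvIsContent c = true ↔ (c ≠ "" ∧ c ≠ "\\textemdash") := by
  simp [pvIsContent]

-- Every range produced by A's first loop covers only non-content cells of the row.
theorem pvFindRanges_inv (row : List String) :
    ∀ (rest : List String) (i : Nat) (ranges : List (Nat × Nat)) (start : Option Nat),
      rest = row.drop i →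
      (∀ r ∈ ranges, ∀ j, r.1 ≤ j → j ≤ r.2 → pvIsContent (row.getD j "") = false) →
      (∀ s, start = some s → s < i ∧ ∀ j, s ≤ j → j < i → pvIsContent (row.getD j "") = false) →
      ∀ r ∈ pvFindRanges row.length rest i ranges start, ∀ j, r.1 ≤ j → j ≤ r.2 →
        pvIsContent (row.getD j "") = false := by
  intro rest
  induction rest with
  | nil =>
    intro i ranges start hdrop hr hs r hrmem j hj1 hj2
    have hlen : row.length ≤ i := by
      by_contra h
      have : row.drop i ≠ [] := by
        simp [List.drop_eq_nil_iff]; omega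
      exact this hdrop.symm
    cases start with
    | none => exact hr r (by simpa [pvFindRanges] using hrmem) j hj1 hj2
    | some s =>
      simp only [pvFindRanges, List.mem_append, List.mem_singleton] at hrmem
      rcases hrmem with h | h
      · exact hr r h j hj1 hj2
      · subst h
        by_cases hjl : j < row.length
        · exact (hs s rfl).2 j hj1 (by omega)
        · have h0 : row.getD j "" = "" := List.getD_eq_default _ _ (by omega)
          rw [h0]; rfl
  | cons c rest' ih =>
    intro i ranges start hdrop hr hs
    have hc : row[i]? = some c := by
      rw [← List.head?_drop, ← hdrop]; rfl
    have hcD : row.getD i "" = c := by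
      simp [List.getD_eq_getElem?_getD, hc]
    have hdrop' : rest' = row.drop (i + 1) := by
      have : row.drop (i + 1) = (row.drop i).tail := by
        rw [List.tail_drop]
      rw [this, ← hdrop]; rfl
    simp only [pvFindRanges]
    by_cases hcc : pvIsContent c = true
    · cases start with
      | none =>
        simp only [hcc, if_true]
        exact ih (i + 1) ranges none hdrop' hr (by intro s h; cases h)
      | some s =>
        simp only [hcc, if_true]
        refine ih (i + 1) (ranges ++ [(s, i - 1)]) none hdrop' ?_ (by intro s h; cases h)
        intro r hrmem j hj1 hj2
        rcases List.mem_append.1 hrmem with h | h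
        · exact hr r h j hj1 hj2
        · simp at h; subst h
          have hsi := hs s rfl
          exact hsi.2 j hj1 (by omega)
    · have hcc' : pvIsContent c = false := by simpa using hcc
      cases start with
      | none =>
        rw [if_neg (by rw [hcc']; exact Bool.false_ne_true)]
        refine ih (i + 1) ranges (some i) hdrop' hr ?_
        intro s h
        injection h with h; subst h
        refine ⟨by omega, ?_⟩
        intro j hj1 hj2
        have : j = i := by omega
        subst this
        rw [hcD]; exact hcc'
      | some s =>
        rw [if_neg (by rw [hcc']; exact Bool.false_ne_true)]
        refine ih (i + 1) ranges (some s) hdrop' hr ?_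
        intro t ht
        injection ht with ht; subst ht
        have hsi := hs s rfl
        refine ⟨by omega, ?_⟩
        intro j hj1 hj2
        by_cases hji : j < i
        · exact hsi.2 j hj1 hji
        · have : j = i := by omega
          subst this
          rw [hcD]; exact hcc'

-- With such ranges, A's second loop is the plain map.
theorem pvProcess_eq_map (row : List String) (ranges : List (Nat × Nat))
    (prev_row : Option (List String))
    (hr : ∀ r ∈ ranges, ∀ j, r.1 ≤ j → j ≤ r.2 → pvIsContent (row.getD j "") = false) :
    ∀ (rest : List String) (i : Nat), rest = row.drop i →
      pvProcess ranges prev_row rest i =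
        rest.map (fun cell => if cell ≠ "" ∧ cell ≠ "\\textemdash" then cell else "") := by
  intro rest
  induction rest with
  | nil => intro i _; simp [pvProcess]
  | cons c rest' ih =>
    intro i hdrop
    have hc : row[i]? = some c := by
      rw [← List.head?_drop, ← hdrop]; rfl
    have hcD : row.getD i "" = c := by
      simp [List.getD_eq_getElem?_getD, hc]
    have hdrop' : rest' = row.drop (i + 1) := by
      have : row.drop (i + 1) = (row.drop i).tail := by
        rw [List.tail_drop]
      rw [this, ← hdrop]; rfl
    by_cases hcc : pvIsContent c = true
    · have hany : ranges.any (fun r => decide (r.1 ≤ i ∧ i ≤ r.2)) = false := by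
        rw [List.any_eq_false]
        intro r hrmem
        rw [decide_eq_true_iff]
        rintro ⟨h1, h2⟩
        have := hr r hrmem i h1 h2
        rw [hcD, hcc] at this
        cases this
      have hmap := (pvIsContent_iff c).1 hcc
      simp only [pvProcess, hcc, if_true, hany, Bool.false_and, Bool.false_eq_true, if_false,
        List.singleton_append, ih (i + 1) hdrop', List.map_cons, if_pos hmap]
    · have hcc' : pvIsContent c = false := by simpa using hcc
      have hmap : ¬ (c ≠ "" ∧ c ≠ "\\textemdash") := fun h => hcc ((pvIsContent_iff c).2 h)
      show (if pvIsContent c = true then _ else "" :: pvProcess ranges prev_row rest' (i+1)) = _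
      rw [if_neg (by rw [hcc']; exact Bool.false_ne_true), ih (i + 1) hdrop',
        List.map_cons, if_neg hmap]

-- ===== VERDICT (by name: the statement is the Claim_ definition above) =====
theorem process_header_row_spec : Claim_equal_process_header_row := by
  intro row prev_row _
  unfold Spec_process_header_row process_header_row process_header_row_alt
  have hr := pvFindRanges_inv row row 0 [] none (by simp) (by simp) (by intro s h; cases h)
  exact pvProcess_eq_map row _ prev_row hr row 0 (by simp)
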